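-- pv_equiv track=rewrite | github.com/jpurma/mgtdb | python/python3/mgtdbpA.py | getMover
-- ===== SOURCE A (Python) =====
-- def getMover(f,moverFeatureLists):
--     mover = []
--     remainder = []
--     for moverFeatureList in moverFeatureLists:
--         if moverFeatureList[0][1] == f:
--             if mover == []:  # OK if we did not already find an f
--                 mover = [moverFeatureList[1:]] # put remainder into singleton list
--             else: # if we find 2 f's, there is an SMC violation
--                 raise RuntimeError('SMC violation in move_check')
--         else: # put others back into remainder list
--             remainder.extend(moverFeatureList)
--     if mover == []:
--         raise RuntimeError('getMover error: no mover found')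
--     else:
--         return (mover,remainder)
-- ===== SOURCE B (Python) =====
-- def getMover(f, moverFeatureLists):
--     # Recursive decomposition: walk the list by structural recursion; the
--     # remainder is assembled back-to-front by prepending each non-matching
--     # list onto the recursive result.  Once the (unique) match is found,
--     # a second recursive phase flattens the tail while policing the SMC.
--     if not moverFeatureLists:
--         raise RuntimeError('getMover error: no mover found')
--     head, tail = moverFeatureLists[0], moverFeatureLists[1:]
--     if head[0][1] == f:
--         return ([head[1:]], _flatNoMatch(f, tail))
--     mover, remainder = getMover(f, tail)
--     return (mover, head + remainder)
--
-- def _flatNoMatch(f, moverFeatureLists):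
--     if not moverFeatureLists:
--         return []
--     if moverFeatureLists[0][0][1] == f:
--         raise RuntimeError('SMC violation in move_check')
--     return moverFeatureLists[0] + _flatNoMatch(f, moverFeatureLists[1:])
-- ===== Notes on version B (the rewrite author's own statement) =====
-- stated objective: alternative
-- what changed: Replaces A's forward loop with mutable mover/remainder accumulators by a two-phase structural recursion: recurse until the matching list is found, prepending non-matching lists onto the recursive remainder (built back-to-front), then a second recursive phase flattens the tail while raising on a second match.
import Mathlib
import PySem

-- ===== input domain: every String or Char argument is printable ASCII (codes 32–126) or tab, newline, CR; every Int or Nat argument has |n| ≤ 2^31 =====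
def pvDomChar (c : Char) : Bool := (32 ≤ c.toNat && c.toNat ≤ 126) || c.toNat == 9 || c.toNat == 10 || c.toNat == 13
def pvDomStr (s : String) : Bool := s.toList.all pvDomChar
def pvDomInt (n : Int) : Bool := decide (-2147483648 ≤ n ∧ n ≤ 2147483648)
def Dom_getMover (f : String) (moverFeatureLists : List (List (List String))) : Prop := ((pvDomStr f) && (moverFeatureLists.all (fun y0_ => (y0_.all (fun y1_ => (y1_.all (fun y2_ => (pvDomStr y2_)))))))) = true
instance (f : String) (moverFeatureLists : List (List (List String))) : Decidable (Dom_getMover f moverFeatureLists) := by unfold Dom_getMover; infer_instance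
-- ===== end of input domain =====

-- B replaces A's single forward accumulator loop by a two-phase structural recursion that builds the remainder back-to-front: an alternative decomposition, same cost.


-- ===== PORT A =====
-- mfl[0][1] as an Option (none = IndexError, excluded by Pre_)
def pvFeat0 (mfl : List (List String)) : Option String :=
  (PySem.List.pyGet? mfl 0).bind (fun h => PySem.List.pyGet? h 1)

-- one iteration of A's for-loop over the state (mover, remainder);
-- on the second match Python raises 'SMC violation' (outside Pre_): the state is left unchanged there
def pvStep (f : String) (st : List (List (List String)) × List (List String)) (mfl : List (List String)) :
    List (List (List String)) × List (List String) :=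
  if pvFeat0 mfl == some f then
    (if st.1 == [] then ([mfl.drop 1], st.2) else st)   -- mfl[1:] = drop 1 (exact)
  else (st.1, st.2 ++ mfl)

-- port of A; when mover == [] at the end Python raises 'no mover found' (outside Pre_): the state is returned as is
def getMover (f : String) (moverFeatureLists : List (List (List String))) :
    List (List (List String)) × List (List String) :=
  moverFeatureLists.foldl (pvStep f) ([], [])

-- ===== PORT B =====
-- B's second phase: flatten the tail after the match; on a further match Python
-- raises 'SMC violation' (outside Pre_): [] is returned there
def pvFlatNoMatch (f : String) : List (List (List String)) → List (List String)
  | [] => []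
  | x :: xs => if pvFeat0 x == some f then [] else x ++ pvFlatNoMatch f xs

-- port of B's recursion; on [] Python raises 'no mover found' (outside Pre_): ([], []) there
def getMover_alt (f : String) (moverFeatureLists : List (List (List String))) :
    List (List (List String)) × List (List String) :=
  match moverFeatureLists with
  | [] => ([], [])
  | x :: xs =>
      if pvFeat0 x == some f then ([x.drop 1], pvFlatNoMatch f xs)
      else
        let r := getMover_alt f xs
        (r.1, x ++ r.2)

-- ===== PRECONDITION & SPEC =====
-- Pre_: exactly the inputs where A returns — every list is indexable at [0][1] (else IndexError)
-- and exactly one list matches f (zero or two matches raise RuntimeError)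
def Pre_getMover (f : String) (moverFeatureLists : List (List (List String))) : Prop :=
  (∀ mfl ∈ moverFeatureLists, (pvFeat0 mfl).isSome) ∧
  (moverFeatureLists.filter (fun mfl => pvFeat0 mfl == some f)).length = 1
instance (f : String) (moverFeatureLists : List (List (List String))) : Decidable (Pre_getMover f moverFeatureLists) := by unfold Pre_getMover; infer_instance

def pvWitness_getMover : String × List (List (List String)) :=
  ("f", [[["a", "f"], ["x"]], [["b", "z"]]])

def Spec_getMover (f : String) (moverFeatureLists : List (List (List String))) (out : List (List (List String)) × List (List String)) : Prop := out = getMover_alt f moverFeatureLists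
instance (f : String) (moverFeatureLists : List (List (List String))) (out : List (List (List String)) × List (List String)) : Decidable (Spec_getMover f moverFeatureLists out) := by unfold Spec_getMover; infer_instance

-- ===== CLAIM (what is proved, stated in full; the proofs are below) =====
def Claim_equal_getMover : Prop := ∀ (f : String) (moverFeatureLists : List (List (List String))), Dom_getMover f moverFeatureLists → Pre_getMover f moverFeatureLists → Spec_getMover f moverFeatureLists (getMover f moverFeatureLists)

-- ===== LEMMAS AND PROOFS =====

-- with no remaining match, A's loop only extends the remainder with every list in order
theorem pvFoldl_none (f : String) (mfls : List (List (List String)))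
    (mov : List (List (List String))) (rem : List (List String))
    (h : ∀ x ∈ mfls, (pvFeat0 x == some f) = false) :
    mfls.foldl (pvStep f) (mov, rem) = (mov, rem ++ mfls.flatMap (fun m => m)) := by
  induction mfls generalizing rem with
  | nil => simp
  | cons x xs ih =>
      have hx := h x (by simp)
      simp only [List.foldl_cons, pvStep, hx, Bool.false_eq_true, if_false]
      rw [ih _ (fun y hy => h y (by simp [hy]))]
      simp

-- with no match, B's second phase is the plain flatten
theorem pvFlatNoMatch_eq (f : String) (mfls : List (List (List String)))
    (h : ∀ x ∈ mfls, (pvFeat0 x == some f) = false) :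
    pvFlatNoMatch f mfls = mfls.flatMap (fun m => m) := by
  induction mfls with
  | nil => rfl
  | cons x xs ih =>
      have hx := h x (by simp)
      simp only [pvFlatNoMatch, hx, Bool.false_eq_true, if_false, List.flatMap_cons]
      rw [ih (fun y hy => h y (by simp [hy]))]

-- with exactly one match, A's loop from ([], rem) yields B's recursive result with rem prepended
theorem pvFoldl_one (f : String) (mfls : List (List (List String))) (rem : List (List String))
    (h : (mfls.filter (fun x => pvFeat0 x == some f)).length = 1) :
    mfls.foldl (pvStep f) ([], rem) =
      ((getMover_alt f mfls).1, rem ++ (getMover_alt f mfls).2) := by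
  induction mfls generalizing rem with
  | nil => simp at h
  | cons x xs ih =>
      by_cases hx : (pvFeat0 x == some f) = true
      · have h' := h
        simp only [List.filter_cons, hx, if_pos, List.length_cons] at h'
        have hxs : (xs.filter (fun x => pvFeat0 x == some f)) = [] :=
          List.length_eq_zero_iff.mp (by omega)
        have hnone : ∀ y ∈ xs, (pvFeat0 y == some f) = false := by
          intro y hy
          simpa using (List.filter_eq_nil_iff.mp hxs) y hy
        simp only [List.foldl_cons, pvStep, hx, if_pos]
        simp only [show (([] : List (List (List String))) == []) = true from rfl, if_true]
        rw [pvFoldl_none f xs _ rem hnone]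
        simp [getMover_alt, hx, pvFlatNoMatch_eq f xs hnone]
      · have hx' : (pvFeat0 x == some f) = false := by simpa using hx
        have h' : (xs.filter (fun x => pvFeat0 x == some f)).length = 1 := by
          simpa [List.filter_cons, hx'] using h
        simp only [List.foldl_cons, pvStep, hx', Bool.false_eq_true, if_false]
        rw [ih _ h']
        simp [getMover_alt, hx']

-- ===== VERDICT (by name: the statement is the Claim_ definition above) =====
theorem getMover_spec : Claim_equal_getMover := by
  intro f mfls _ hpre
  unfold Spec_getMover getMover
  rw [pvFoldl_one f mfls [] hpre.2]
  simp
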